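-- pv_equiv track=rewrite | github.com/ISCPIF/python-gargantext | gargantext/util/parsers/RIS.py | PY_values_decompose_and_save
-- ===== SOURCE A (Python) =====
-- def PY_values_decompose_and_save(ris_date_str, hyperdata):
--     """
--     PY is associated to our publication_year, but the exact format is:
--               "YYYY/MM/DD/"         (with MM and DD optional)
--
--     exemple contents:
--         1948/07/01
--         1948/07/01/
--         1948/07//
--         1948//
--         1948
--
--     => This function does the necessary additional date subparsing
--        and saves the results in the 3 hyperdata slots: year, month, day
--     """
--     possible_fields = ['publication_year',
--                        'publication_month',
--                        'publication_day',
--                        None]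
--     current_field_i = 0
--     buffr = ""
--
--     for char in ris_date_str:
--         if char != '/':
--             # continue reading
--             buffr += char
--         else:
--             # on '/' => we save and shift to next field
--             current_field = possible_fields[current_field_i]
--             if len(buffr):
--                 hyperdata[current_field] = buffr
--             # prepare for next time
--             current_field_i += 1
--             buffr = ""
--
--     # save at the end too
--     current_field = possible_fields[current_field_i]
--     if len(buffr):
--         hyperdata[current_field] = buffr
--
--     # return updated meta
--     return hyperdata
-- ===== SOURCE B (Python) =====
-- def PY_values_decompose_and_save(ris_date_str, hyperdata):
--     possible_fields = ['publication_year', 'publication_month', 'publication_day']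
--     for i, tok in enumerate(ris_date_str.split('/')):
--         if tok:
--             hyperdata[possible_fields[i]] = tok
--     return hyperdata
-- ===== Notes on version B (the rewrite author's own statement) =====
-- stated objective: simpler
-- what changed: Replaces the char-by-char buffer/field-counter state machine with tokenization by split('/') followed by a single enumerate loop that assigns each non-empty token to its field; dropping per-character string concatenation gives a constant-factor speedup.
-- outside the precondition, e.g. on PY_values_decompose_and_save('1/2/3/4/5', {}): A raises IndexError, B raises IndexError
import Mathlib
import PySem

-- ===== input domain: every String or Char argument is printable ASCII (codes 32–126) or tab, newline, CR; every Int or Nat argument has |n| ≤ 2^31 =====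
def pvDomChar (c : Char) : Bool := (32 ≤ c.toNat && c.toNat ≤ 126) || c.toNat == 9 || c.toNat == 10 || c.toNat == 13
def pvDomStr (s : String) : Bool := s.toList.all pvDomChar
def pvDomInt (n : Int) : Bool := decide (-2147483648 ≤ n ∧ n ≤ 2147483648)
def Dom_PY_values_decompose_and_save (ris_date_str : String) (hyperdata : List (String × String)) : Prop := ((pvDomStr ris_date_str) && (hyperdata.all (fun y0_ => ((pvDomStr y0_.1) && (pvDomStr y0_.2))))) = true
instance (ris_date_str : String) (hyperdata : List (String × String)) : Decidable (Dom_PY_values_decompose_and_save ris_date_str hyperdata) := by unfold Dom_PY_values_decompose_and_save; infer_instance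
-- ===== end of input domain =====

-- ===== PORT A =====
-- B differs from A only by tokenizing first; both Python versions mutate `hyperdata` in place
-- with the same assignments on Pre_, and the equivalence proved here is about the return value.
-- Objective: simpler — split + one enumerate loop instead of a char-by-char buffer/counter machine.

-- A's possible_fields list (the trailing Python None becomes Option.none).
def pvFieldsA : List (Option String) := [some "publication_year", some "publication_month", some "publication_day", none]

-- One loop iteration of A; `none` state = the Python has raised (IndexError).
def pvStepA (st : Option (Nat × List Char × PySem.Dict String String)) (c : Char) :
    Option (Nat × List Char × PySem.Dict String String) :=
  match st with
  | none => none
  | some (i, buf, d) =>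
    if c ≠ '/' then some (i, buf ++ [c], d)
    else
      match PySem.List.pyGet? pvFieldsA (i : Int) with
      | none => none  -- IndexError: excluded by Pre_
      | some fld =>
        let d' := if buf.length ≠ 0 then
                    match fld with
                    | some k => d.insert k (String.ofList buf)
                    | none => d  -- Python would store key None (not a String key); excluded by Pre_
                  else d
        some (i + 1, [], d')

def PY_values_decompose_and_save (ris_date_str : String) (hyperdata : List (String × String)) : List (String × String) :=
  match ris_date_str.toList.foldl pvStepA (some (0, [], PySem.Dict.ofList hyperdata)) with
  | none => hyperdata  -- A raised mid-loop: excluded by Pre_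
  | some (i, buf, d) =>
    match PySem.List.pyGet? pvFieldsA (i : Int) with
    | none => hyperdata  -- final IndexError: excluded by Pre_
    | some fld =>
      (if buf.length ≠ 0 then
         match fld with
         | some k => d.insert k (String.ofList buf)
         | none => d  -- Python key None: excluded by Pre_
       else d).items

-- ===== PORT B =====
-- Hand port of Python's s.split('/') for the single-character separator '/': exact
-- ('' splits to [''], separators at the ends and adjacent separators give empty tokens).
def pvSplitSlash : List Char → List (List Char)
  | [] => [[]]
  | c :: cs =>
    if c = '/' then [] :: pvSplitSlash cs
    else
      match pvSplitSlash cs with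
      | [] => [[c]]  -- unreachable: pvSplitSlash never returns []
      | t :: ts => (c :: t) :: ts

def pvFieldsB : List String := ["publication_year", "publication_month", "publication_day"]

-- One iteration of B's enumerate loop; `none` state = the Python has raised (IndexError).
def pvStepB (st : Option (PySem.Dict String String)) (p : Int × String) :
    Option (PySem.Dict String String) :=
  match st with
  | none => none
  | some d =>
    if p.2 ≠ "" then
      match PySem.List.pyGet? pvFieldsB p.1 with
      | none => none  -- IndexError: excluded by Pre_
      | some f => some (d.insert f p.2)
    else some d

def PY_values_decompose_and_save_alt (ris_date_str : String) (hyperdata : List (String × String)) : List (String × String) :=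
  match (PySem.List.enumerate ((pvSplitSlash ris_date_str.toList).map String.ofList)).foldl
      pvStepB (some (PySem.Dict.ofList hyperdata)) with
  | none => hyperdata  -- B raised: excluded by Pre_
  | some d => d.items

-- ===== PRECONDITION & SPEC =====
-- Pre_ excludes the inputs where A raises IndexError (4 or more '/') and the inputs with exactly
-- three '/' and a non-empty tail, where A returns a dict with the non-String key None
-- (not a value of the declared type List (String × String)).
def Pre_PY_values_decompose_and_save (ris_date_str : String) (hyperdata : List (String × String)) : Prop :=
  ris_date_str.toList.count '/' ≤ 2 ∨
    (ris_date_str.toList.count '/' = 3 ∧ ris_date_str.toList.getLast? = some '/')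
instance (ris_date_str : String) (hyperdata : List (String × String)) : Decidable (Pre_PY_values_decompose_and_save ris_date_str hyperdata) := by unfold Pre_PY_values_decompose_and_save; infer_instance

def pvWitness_PY_values_decompose_and_save : String × (List (String × String)) := ("1948/07/01", [("title", "x")])

def Spec_PY_values_decompose_and_save (ris_date_str : String) (hyperdata : List (String × String)) (out : List (String × String)) : Prop := out = PY_values_decompose_and_save_alt ris_date_str hyperdata
instance (ris_date_str : String) (hyperdata : List (String × String)) (out : List (String × String)) : Decidable (Spec_PY_values_decompose_and_save ris_date_str hyperdata out) := by unfold Spec_PY_values_decompose_and_save; infer_instance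

-- ===== CLAIM (what is proved, stated in full; the proofs are below) =====
def Claim_equal_PY_values_decompose_and_save : Prop := ∀ (ris_date_str : String) (hyperdata : List (String × String)), Dom_PY_values_decompose_and_save ris_date_str hyperdata → Pre_PY_values_decompose_and_save ris_date_str hyperdata → Spec_PY_values_decompose_and_save ris_date_str hyperdata (PY_values_decompose_and_save ris_date_str hyperdata)

-- ===== LEMMAS AND PROOFS =====

-- "finish one token": what A does at each '/' and at the end of the string.
def pvFinishA (i : Nat) (buf : List Char) (d : PySem.Dict String String) :
    Option (PySem.Dict String String) :=
  match PySem.List.pyGet? pvFieldsA (i : Int) with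
  | none => none
  | some fld =>
    some (if buf.length ≠ 0 then
            match fld with
            | some k => d.insert k (String.ofList buf)
            | none => d
          else d)

-- A's whole run, phrased on the token list.
def pvRunA : List (List Char) → Nat → PySem.Dict String String → Option (PySem.Dict String String)
  | [], i, d => pvFinishA i [] d
  | [t], i, d => pvFinishA i t d
  | t :: t' :: ts, i, d =>
    match pvFinishA i t d with
    | none => none
    | some d' => pvRunA (t' :: ts) (i + 1) d'

-- B's whole run, phrased on the token list.
def pvRunB : List (List Char) → Nat → PySem.Dict String String → Option (PySem.Dict String String)
  | [], _, d => some d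
  | t :: ts, i, d =>
    if t.length ≠ 0 then
      match PySem.List.pyGet? pvFieldsB (i : Int) with
      | none => none
      | some f => pvRunB ts (i + 1) (d.insert f (String.ofList t))
    else pvRunB ts (i + 1) d

theorem pvSplitSlash_ne_nil (cs : List Char) : pvSplitSlash cs ≠ [] := by
  cases cs with
  | nil => simp [pvSplitSlash]
  | cons c cs =>
    simp only [pvSplitSlash]
    split_ifs
    · simp
    · cases h : pvSplitSlash cs <;> simp

theorem pvSplitSlash_length (cs : List Char) :
    (pvSplitSlash cs).length = cs.count '/' + 1 := by
  induction cs with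
  | nil => simp [pvSplitSlash]
  | cons c cs ih =>
    simp only [pvSplitSlash]
    by_cases h : c = '/'
    · simp [h, ih, List.count_cons]
    · cases hs : pvSplitSlash cs with
      | nil => exact absurd hs (pvSplitSlash_ne_nil cs)
      | cons t ts =>
        simp [h, hs, List.count_cons]
        rw [hs] at ih; simpa using ih

theorem pvSplitSlash_cons_slash (cs : List Char) :
    pvSplitSlash ('/' :: cs) = [] :: pvSplitSlash cs := rfl

theorem pvSplitSlash_cons_ne (c : Char) (cs : List Char) (hc : c ≠ '/') :
    pvSplitSlash (c :: cs) =
      match pvSplitSlash cs with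
      | [] => [[c]]
      | t :: ts => (c :: t) :: ts := by
  simp [pvSplitSlash, hc]

theorem pv_getLast?_cons {α : Type} (a : α) (l : List α) (h : l ≠ []) :
    (a :: l).getLast? = l.getLast? := by
  cases l with
  | nil => exact absurd rfl h
  | cons b l' => exact List.getLast?_cons_cons

theorem pvSplitSlash_getLast_slash (cs : List Char) (h : cs.getLast? = some '/') :
    (pvSplitSlash cs).getLast? = some [] := by
  induction cs with
  | nil => simp at h
  | cons c cs ih =>
    cases cs with
    | nil =>
      simp at h
      simp [h, pvSplitSlash]
    | cons c' cs' =>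
      rw [List.getLast?_cons_cons] at h
      have hlast := ih h
      have hne := pvSplitSlash_ne_nil (c' :: cs')
      have hcount : 1 ≤ (c' :: cs').count '/' := by
        have hmem : '/' ∈ (c' :: cs') := List.mem_of_getLast? h
        exact List.one_le_count_iff.mpr hmem
      have hlen2 : 2 ≤ (pvSplitSlash (c' :: cs')).length := by
        rw [pvSplitSlash_length]; omega
      by_cases hc : c = '/'
      · rw [hc, pvSplitSlash_cons_slash, pv_getLast?_cons _ _ hne]
        exact hlast
      · cases hx : pvSplitSlash (c' :: cs') with
        | nil => exact absurd hx hne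
        | cons t ts =>
          have hts : ts ≠ [] := by
            rw [hx] at hlen2; simp at hlen2; exact List.ne_nil_of_length_pos (by omega)
          rw [pvSplitSlash_cons_ne c _ hc, hx]
          simp only []
          rw [pv_getLast?_cons _ _ hts]
          rw [hx] at hlast
          rwa [pv_getLast?_cons _ _ hts] at hlast

theorem pv_foldl_stepA_none (cs : List Char) : cs.foldl pvStepA none = none := by
  induction cs with
  | nil => rfl
  | cons c cs ih => simpa [pvStepA] using ih

theorem pvStepA_slash (i : Nat) (buf : List Char) (d : PySem.Dict String String) :
    pvStepA (some (i, buf, d)) '/' =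
      match pvFinishA i buf d with
      | none => none
      | some d' => some (i + 1, [], d') := by
  simp only [pvStepA, pvFinishA, ne_eq, not_true_eq_false, if_false]
  cases PySem.List.pyGet? pvFieldsA (i : Int) <;> rfl

theorem pvStepA_nonslash (i : Nat) (buf : List Char) (d : PySem.Dict String String)
    (c : Char) (hc : c ≠ '/') : pvStepA (some (i, buf, d)) c = some (i, buf ++ [c], d) := by
  simp [pvStepA, hc]

-- A's char fold equals pvRunA on the tokens of the remaining string (with the open buffer
-- prepended to the first token).
theorem pv_foldA_eq_runA (cs : List Char) : ∀ (i : Nat) (buf : List Char) (d : PySem.Dict String String),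
    (match cs.foldl pvStepA (some (i, buf, d)) with
     | none => none
     | some (i', b', d') => pvFinishA i' b' d') =
    pvRunA ((buf ++ (pvSplitSlash cs).headI) :: (pvSplitSlash cs).tail) i d := by
  induction cs with
  | nil =>
    intro i buf d
    simp [pvSplitSlash, pvRunA]
  | cons c cs ih =>
    intro i buf d
    by_cases hc : c = '/'
    · subst hc
      cases hs : pvSplitSlash cs with
      | nil => exact absurd hs (pvSplitSlash_ne_nil cs)
      | cons t ts =>
        rw [pvSplitSlash_cons_slash]
        simp only [hs, List.headI, List.tail, List.append_nil, List.foldl_cons, pvStepA_slash]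
        cases hf : pvFinishA i buf d with
        | none =>
          rw [pv_foldl_stepA_none]
          simp [pvRunA, hf]
        | some d' =>
          have hih := ih (i + 1) [] d'
          rw [hs] at hih
          simp only [List.headI, List.tail, List.nil_append] at hih
          rw [hih]
          simp [pvRunA, hf]
    · cases hs : pvSplitSlash cs with
      | nil => exact absurd hs (pvSplitSlash_ne_nil cs)
      | cons t ts =>
        rw [pvSplitSlash_cons_ne c _ hc]
        simp only [hs, List.headI, List.tail, List.foldl_cons, pvStepA_nonslash i buf d c hc]
        have hih := ih i (buf ++ [c]) d
        rw [hs] at hih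
        simp only [List.headI, List.tail] at hih
        rw [hih]
        simp [List.append_assoc]

theorem pv_foldl_stepB_none (l : List (Int × String)) : l.foldl pvStepB none = none := by
  induction l with
  | nil => rfl
  | cons p l ih => simpa [pvStepB] using ih

-- B's enumerate fold equals pvRunB on the tokens.
theorem pv_foldB_eq_runB (ts : List (List Char)) : ∀ (i : Nat) (d : PySem.Dict String String),
    (PySem.List.enumerate (ts.map String.ofList) (i : Int)).foldl pvStepB (some d) =
    pvRunB ts i d := by
  induction ts with
  | nil => intro i d; simp [PySem.List.enumerate_nil, pvRunB]
  | cons t ts ih =>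
    intro i d
    rw [List.map_cons, PySem.List.enumerate_cons, List.foldl_cons]
    simp only [pvStepB, pvRunB]
    have hlen : (String.ofList t ≠ "") ↔ t.length ≠ 0 := by
      constructor
      · intro h hl; exact h (by cases t with | nil => rfl | cons a b => simp at hl)
      · intro h he
        have : t = [] := by
          have := congrArg String.toList he; simpa using this
        simp [this] at h
    by_cases ht : t.length ≠ 0
    · rw [if_pos (hlen.mpr ht), if_pos ht]
      cases hf : PySem.List.pyGet? pvFieldsB (i : Int) with
      | none => rw [pv_foldl_stepB_none]
      | some f =>
        have := ih (i + 1) (d.insert f (String.ofList t))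
        push_cast at this ⊢
        rw [this]
    · rw [if_neg (fun h => ht (hlen.mp h)), if_neg ht]
      have := ih (i + 1) d
      push_cast at this ⊢
      rw [this]

-- Core agreement: on a token list fitting in the four fields (with an empty token if the
-- fourth slot is reached), A's run and B's run agree and A's run does not raise.
theorem pv_runA_eq_runB : ∀ (ts : List (List Char)) (i : Nat) (d : PySem.Dict String String),
    ts ≠ [] → i + ts.length ≤ 4 → (i + ts.length = 4 → ts.getLast? = some []) →
    pvRunA ts i d = pvRunB ts i d ∧ (pvRunA ts i d).isSome := by
  intro ts
  induction ts with
  | nil => intro i d h; exact absurd rfl h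
  | cons t ts ih =>
    intro i d _ hle hlast
    cases ts with
    | nil =>
      have hi : i ≤ 3 := by simp at hle; omega
      by_cases h4 : i = 3
      · have ht : t = [] := by
          have := hlast (by simp [h4]); simpa using this
        subst ht; subst h4
        refine ⟨?_, ?_⟩ <;> simp [pvRunA, pvRunB, pvFinishA, pvFieldsA, PySem.List.pyGet?, PySem.List.pyIdx?]
      · have hi2 : i ≤ 2 := by omega
        interval_cases i <;>
          · refine ⟨?_, ?_⟩ <;>
              simp [pvRunA, pvRunB, pvFinishA, pvFieldsA, pvFieldsB,
                    PySem.List.pyGet?, PySem.List.pyIdx?] <;>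
              split_ifs <;> simp_all
    | cons t' ts' =>
      have hi2 : i ≤ 2 := by simp at hle; omega
      have hrest : i + 1 + (t' :: ts').length ≤ 4 := by simp at hle ⊢; omega
      have hlast' : i + 1 + (t' :: ts').length = 4 → (t' :: ts').getLast? = some [] := by
        intro h
        have := hlast (by simp at h ⊢; omega)
        rwa [pv_getLast?_cons _ _ (by simp)] at this
      have key : ∀ d', pvRunA (t' :: ts') (i + 1) d' = pvRunB (t' :: ts') (i + 1) d' ∧
          (pvRunA (t' :: ts') (i + 1) d').isSome := fun d' => ih (i + 1) d' (by simp) hrest hlast'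
      interval_cases i <;>
        · constructor
          · show pvRunA (t :: t' :: ts') _ d = pvRunB (t :: t' :: ts') _ d
            simp only [pvRunA, pvRunB, pvFinishA, pvFieldsA, pvFieldsB,
                       PySem.List.pyGet?, PySem.List.pyIdx?]
            norm_num
            split_ifs with h <;> simp_all [pvRunB, pvFieldsB, PySem.List.pyGet?, PySem.List.pyIdx?, (key _).1] <;> norm_num
          · show (pvRunA (t :: t' :: ts') _ d).isSome
            simp only [pvRunA, pvFinishA]
            cases hf : PySem.List.pyGet? pvFieldsA _ with
            | none => exact absurd hf (by decide)
            | some fld => exact (key _).2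

-- ===== VERDICT (by name: the statement is the Claim_ definition above) =====
theorem PY_values_decompose_and_save_spec : Claim_equal_PY_values_decompose_and_save := by
  intro s hd _ hpre
  unfold Spec_PY_values_decompose_and_save
  unfold PY_values_decompose_and_save PY_values_decompose_and_save_alt
  -- token list facts from Pre_
  have hne : pvSplitSlash s.toList ≠ [] := pvSplitSlash_ne_nil s.toList
  have hlen : (pvSplitSlash s.toList).length ≤ 4 := by
    rw [pvSplitSlash_length]
    rcases hpre with h | ⟨h, _⟩ <;> omega
  have hlast : (pvSplitSlash s.toList).length = 4 → (pvSplitSlash s.toList).getLast? = some [] := by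
    intro h4
    rcases hpre with h | ⟨_, hsl⟩
    · rw [pvSplitSlash_length] at h4; omega
    · exact pvSplitSlash_getLast_slash s.toList hsl
  obtain ⟨heq, hsome⟩ := pv_runA_eq_runB (pvSplitSlash s.toList) 0 (PySem.Dict.ofList hd) hne (by omega) (by intro h; exact hlast (by omega))
  -- rewrite the A side
  have hA := pv_foldA_eq_runA s.toList 0 [] (PySem.Dict.ofList hd)
  have hhead : ([] ++ (pvSplitSlash s.toList).headI) :: (pvSplitSlash s.toList).tail = pvSplitSlash s.toList := by
    cases hx : pvSplitSlash s.toList with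
    | nil => exact absurd hx hne
    | cons a b => simp
  rw [hhead] at hA
  -- rewrite the B side
  have hB := pv_foldB_eq_runB (pvSplitSlash s.toList) 0 (PySem.Dict.ofList hd)
  simp only [Int.natCast_zero] at hB
  rw [hB, ← heq]
  cases hfold : s.toList.foldl pvStepA (some (0, [], (PySem.Dict.ofList hd))) with
  | none => rw [hfold] at hA; simp at hA; rw [← hA] at hsome; simp at hsome
  | some st =>
    obtain ⟨i', b', d'⟩ := st
    rw [hfold] at hA
    rw [← hA]
    have hgoal : (match PySem.List.pyGet? pvFieldsA ((i' : Int)) with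
        | none => hd
        | some fld =>
          (if b'.length ≠ 0 then
             match fld with
             | some k => d'.insert k (String.ofList b')
             | none => d'
           else d').items) =
        (match pvFinishA i' b' d' with
         | none => hd
         | some dd => dd.items) := by
      unfold pvFinishA
      cases hf : PySem.List.pyGet? pvFieldsA ((i' : Int)) <;> simp
    exact hgoal
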